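-- pv_equiv track=rewrite | github.com/beatrizpacheco/AIVA_2021-Crotales_GrupoH | ReconocedorNumeros.py | get_number_data
-- ===== SOURCE A (Python) =====
-- def get_number_data(dato):
--     contador = 0
--     numbers = ""
--     for _, j in enumerate(dato[::-1]):
--         if j.isnumeric():
--             numbers = numbers + j
--             contador += 1
--             if contador == 4:
--                 break
--     numbers = numbers[::-1]
--     return numbers
-- ===== SOURCE B (Python) =====
-- def get_number_data(dato):
--     collected = [c for c in dato if c.isnumeric()]
--     return "".join(collected[-4:])
-- ===== Notes on version B (the rewrite author's own statement) =====
-- stated objective: simpler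
-- what changed: Replaces A's reverse iteration with a counter, break-at-4 and final re-reversal by a single forward filter of numeric characters followed by a last-four tail slice.
import Mathlib
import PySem

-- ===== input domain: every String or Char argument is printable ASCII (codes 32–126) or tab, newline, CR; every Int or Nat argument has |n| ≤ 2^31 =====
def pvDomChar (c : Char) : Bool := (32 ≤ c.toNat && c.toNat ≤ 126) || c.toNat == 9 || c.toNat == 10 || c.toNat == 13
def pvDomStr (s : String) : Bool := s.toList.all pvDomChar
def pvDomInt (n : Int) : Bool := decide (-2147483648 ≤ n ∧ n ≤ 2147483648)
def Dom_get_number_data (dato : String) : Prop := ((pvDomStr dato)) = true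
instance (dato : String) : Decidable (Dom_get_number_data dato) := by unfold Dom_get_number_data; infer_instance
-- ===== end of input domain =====

-- B replaces A's reverse scan with counter/break/re-reverse by a forward filter plus a last-four
-- tail slice (objective: simpler). Python's isnumeric coincides with isdigit on the ASCII domain.

-- ===== PORT A =====
-- loop over dato[::-1] collecting numeric chars, breaking after four, then re-reversing
def pvGoA : List Char → Nat → List Char → List Char
  | [], _, numbers => numbers
  | j :: rest, contador, numbers =>
    if PySem.Chars.isdigit j then
      let numbers := numbers ++ [j]
      let contador := contador + 1
      if contador == 4 then numbers else pvGoA rest contador numbers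
    else pvGoA rest contador numbers

def get_number_data (dato : String) : String :=
  String.ofList (pvGoA dato.toList.reverse 0 []).reverse

-- ===== PORT B =====
def get_number_data_alt (dato : String) : String :=
  let collected := dato.toList.filter PySem.Chars.isdigit
  String.ofList (PySem.List.slice collected (some (-4)) none)

-- ===== PRECONDITION & SPEC =====
def Spec_get_number_data (dato : String) (out : String) : Prop := out = get_number_data_alt dato
instance (dato : String) (out : String) : Decidable (Spec_get_number_data dato out) := by unfold Spec_get_number_data; infer_instance

-- ===== CLAIM (what is proved, stated in full; the proofs are below) =====
def Claim_equal_get_number_data : Prop := ∀ (dato : String), Dom_get_number_data dato → Spec_get_number_data dato (get_number_data dato)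

-- ===== LEMMAS AND PROOFS =====
theorem pvGoA_eq_take (l : List Char) : ∀ (c : Nat) (acc : List Char), c < 4 →
    pvGoA l c acc = acc ++ (l.filter PySem.Chars.isdigit).take (4 - c) := by
  induction l with
  | nil => intro c acc _; simp [pvGoA]
  | cons j rest ih =>
    intro c acc hc
    by_cases hd : PySem.Chars.isdigit j
    · simp only [pvGoA, hd, if_true]
      by_cases h4 : c + 1 = 4
      · have hc3 : c = 3 := by omega
        subst hc3
        simp [hd]
      · have hlt : c + 1 < 4 := by omega
        have : (c + 1 == 4) = false := by simp; omega
        rw [this]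
        simp only [Bool.false_eq_true, if_false]
        rw [ih (c + 1) (acc ++ [j]) hlt]
        have : 4 - c = (4 - (c + 1)) + 1 := by omega
        simp [hd, this]
    · simp only [pvGoA, hd, if_false]
      rw [ih c acc hc]
      simp [hd]

-- ===== VERDICT (by name: the statement is the Claim_ definition above) =====
theorem get_number_data_spec : Claim_equal_get_number_data := by
  intro dato _
  unfold Spec_get_number_data get_number_data get_number_data_alt
  rw [pvGoA_eq_take _ 0 [] (by omega)]
  have h4 : PySem.List.clampIdx (dato.toList.filter PySem.Chars.isdigit).length (-4)
      = (dato.toList.filter PySem.Chars.isdigit).length - 4 :=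
    PySem.List.clampIdx_neg_ofNat _ 4 (by omega)
  show String.ofList ([] ++ (dato.toList.reverse.filter PySem.Chars.isdigit).take (4 - 0)).reverse = String.ofList (PySem.List.slice (dato.toList.filter PySem.Chars.isdigit) (some (-4)) none)
  rw [PySem.List.slice_some_none, h4, List.filter_reverse, List.take_reverse]
  simp
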